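-- pv_equiv track=rewrite | github.com/aryashanvi-boop/Web_dev_project | speech_to_asl/app.py | translate_text_to_gestures
-- ===== SOURCE A (Python) =====
-- ASL_DICT = {
--     'hello': 'hello.gif',
--     'thank you': 'thank you.gif',
--     'yes': 'yes.gif',
--     'no': 'no.gif',
--     'please': 'please.gif'
-- }
--
-- def translate_text_to_gestures(text: str):
--     text = (text or "").lower().strip()
--     tokens = text.split()
--     gestures = []
--
--     # greedy phrase matching first (e.g., "thank you")
--     phrase_keys = sorted(ASL_DICT.keys(), key=lambda k: len(k.split()), reverse=True)
--     i = 0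
--     while i < len(tokens):
--         matched = False
--         for k in phrase_keys:
--             klen = len(k.split())
--             if i + klen <= len(tokens):
--                 cand = " ".join(tokens[i:i+klen])
--                 if cand == k:
--                     gestures.append(ASL_DICT[k])
--                     i += klen
--                     matched = True
--                     break
--         if matched:
--             continue
--
--         # fallback: fingerspell letters for this token
--         for ch in tokens[i]:
--             if ch.isalpha():
--                 gestures.append(f"{ch.lower()}.gif")
--         i += 1
--     return gestures
-- ===== SOURCE B (Python) =====
-- ASL_DICT = {
--     'hello': 'hello.gif',
--     'thank you': 'thank you.gif',
--     'yes': 'yes.gif',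
--     'no': 'no.gif',
--     'please': 'please.gif'
-- }
--
-- # phrases tried longest-first; each as its list of words, paired with its key
-- _PHRASES = [(k.split(), k) for k in sorted(ASL_DICT, key=lambda k: -len(k.split()))]
--
-- def _segment(tokens):
--     """Stage 1: cut the token list into segments: dict keys or single raw tokens."""
--     segs = []
--     while tokens:
--         for words, k in _PHRASES:
--             if tokens[:len(words)] == words:
--                 segs.append(k)
--                 tokens = tokens[len(words):]
--                 break
--         else:
--             segs.append(tokens[0])
--             tokens = tokens[1:]
--     return segs
--
-- def _emit(seg):
--     """Stage 2: gestures for one segment: its dict entry, else fingerspelling."""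
--     if seg in ASL_DICT:
--         return [ASL_DICT[seg]]
--     return [c.lower() + ".gif" for c in seg if c.isalpha()]
--
-- def translate_text_to_gestures(text: str):
--     tokens = (text or "").lower().strip().split()
--     return [g for seg in _segment(tokens) for g in _emit(seg)]
-- ===== Notes on version B (the rewrite author's own statement) =====
-- stated objective: alternative
-- what changed: A interleaves phrase matching and gesture emission in one while-loop that re-sorts the keys per call and compares string joins of token slices; B is two staged passes: a segmentation pass that cuts the token list into dict phrases or single tokens by comparing token slices against pre-split word lists (no joins), then a flat-map pass emitting gestures per segment.
import Mathlib
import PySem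

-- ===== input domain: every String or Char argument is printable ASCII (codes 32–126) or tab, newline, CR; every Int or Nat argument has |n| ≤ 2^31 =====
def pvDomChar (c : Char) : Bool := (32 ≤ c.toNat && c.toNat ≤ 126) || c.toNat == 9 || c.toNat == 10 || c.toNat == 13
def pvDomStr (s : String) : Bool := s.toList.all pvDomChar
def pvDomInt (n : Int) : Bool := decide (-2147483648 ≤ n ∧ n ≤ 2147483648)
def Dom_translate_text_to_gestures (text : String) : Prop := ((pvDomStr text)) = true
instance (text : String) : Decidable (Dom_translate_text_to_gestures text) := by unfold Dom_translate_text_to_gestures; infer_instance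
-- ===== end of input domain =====

-- B restructures A's single interleaved while-loop into two staged passes — first segment the
-- token list (comparing token slices with pre-split word lists, no string joins), then flat-map
-- each segment to its gestures (objective: alternative decomposition, same cost).

-- ===== PORT A =====
def ASL_DICT : PySem.Dict String String :=
  PySem.Dict.ofList [("hello","hello.gif"),("thank you","thank you.gif"),
                     ("yes","yes.gif"),("no","no.gif"),("please","please.gif")]

-- phrase_keys = sorted(ASL_DICT.keys(), key=lambda k: len(k.split()), reverse=True)
def aPhraseKeys : List String :=
  PySem.List.sorted (PySem.Dict.keys ASL_DICT) (fun k => (PySem.Str.split₀ k).length) true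

-- the inner 'for k in phrase_keys: … break' loop; returns (ASL_DICT[k], klen) for the first match.
-- ASL_DICT[k]: k is drawn from ASL_DICT's keys, so the lookup never raises; getD's default is never taken.
def aFindMatch (tokens : List String) (i : Nat) : List String → Option (String × Nat)
  | [] => none
  | k :: rest =>
    let klen := (PySem.Str.split₀ k).length
    if i + klen ≤ tokens.length then
      let cand := PySem.Str.join " " (PySem.List.slice tokens (some (i : Int)) (some ((i : Int) + (klen : Int))))
      if cand = k then some (PySem.Dict.getD ASL_DICT k "", klen)
      else aFindMatch tokens i rest
    else aFindMatch tokens i rest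

-- any key matched by aFindMatch has 1 ≤ klen and fits; needed by aLoop's termination
theorem aFindMatch_bounds (tokens : List String) (i : Nat) (ks : List String)
    (hks : ∀ k ∈ ks, 0 < (PySem.Str.split₀ k).length) (g : String) (klen : Nat)
    (h : aFindMatch tokens i ks = some (g, klen)) : 0 < klen ∧ i + klen ≤ tokens.length := by
  induction ks with
  | nil => simp [aFindMatch] at h
  | cons k rest ih =>
    simp only [aFindMatch] at h
    split at h
    · split at h
      · simp only [Option.some.injEq, Prod.mk.injEq] at h
        have hk := hks k (by simp)
        rename_i hfit _
        omega
      · exact ih (fun k hk => hks k (by simp [hk])) h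
    · exact ih (fun k hk => hks k (by simp [hk])) h

-- the 'while i < len(tokens)' loop of A
def aLoop (tokens : List String) (i : Nat) (gestures : List String) : List String :=
  if h : i < tokens.length then
    match hm : aFindMatch tokens i aPhraseKeys with
    | some (g, klen) => aLoop tokens (i + klen) (gestures ++ [g])
    | none =>
      -- fingerspell: for ch in tokens[i]: if ch.isalpha(): gestures.append(f"{ch.lower()}.gif")
      aLoop tokens (i + 1)
        (tokens[i].toList.foldl
          (fun acc c => if PySem.Chars.isalpha c then
              acc ++ [String.ofList [PySem.Chars.lowerChar c, '.', 'g', 'i', 'f']] else acc)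
          gestures)
  else gestures
termination_by tokens.length - i
decreasing_by
  · have := aFindMatch_bounds tokens i aPhraseKeys (by decide) g klen hm; omega
  · omega

def translate_text_to_gestures (text : String) : List String :=
  -- (text or "") is text itself when text is a str ("" or "" == "")
  let tokens := PySem.Str.split₀ (PySem.Str.strip (PySem.Str.lower text))
  aLoop tokens 0 []

-- ===== PORT B =====
-- _PHRASES = [(k.split(), k) for k in sorted(ASL_DICT, key=lambda k: -len(k.split()))]
def bPhrases : List (List String × String) :=
  (PySem.List.sorted (PySem.Dict.keys ASL_DICT)
      (fun k => -(((PySem.Str.split₀ k).length : Int))) false).map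
    (fun k => (PySem.Str.split₀ k, k))

-- the 'for words, k in _PHRASES: … break/else' of _segment
def bSegTry (tokens : List String) : List (List String × String) → Option (String × Nat)
  | [] => none
  | (words, k) :: rest =>
    if tokens.take words.length = words then some (k, words.length)
    else bSegTry tokens rest

theorem bSegTry_pos (tokens : List String) (ps : List (List String × String))
    (hps : ∀ p ∈ ps, 0 < p.1.length) (k : String) (n : Nat)
    (h : bSegTry tokens ps = some (k, n)) : 0 < n := by
  induction ps with
  | nil => simp [bSegTry] at h
  | cons p rest ih =>
    obtain ⟨words, key⟩ := p
    simp only [bSegTry] at h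
    split at h
    · simp only [Option.some.injEq, Prod.mk.injEq] at h
      have := hps (words, key) (by simp)
      simp at this
      omega
    · exact ih (fun q hq => hps q (by simp [hq])) h

-- stage 1: the 'while tokens:' loop of _segment, consuming the token list
def bSegment (tokens : List String) : List String :=
  if h : tokens = [] then []
  else
    match hm : bSegTry tokens bPhrases with
    | some (k, n) => k :: bSegment (tokens.drop n)
    | none => tokens.head h :: bSegment tokens.tail
termination_by tokens.length
decreasing_by
  · have := bSegTry_pos tokens bPhrases (by decide) k n hm
    have : tokens.length ≠ 0 := fun hz => h (List.eq_nil_of_length_eq_zero hz)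
    simp [List.length_drop]; omega
  · cases tokens with
    | nil => exact absurd rfl h
    | cons a l => simp

-- stage 2: gestures for one segment
def bEmit (seg : String) : List String :=
  match PySem.Dict.get? ASL_DICT seg with
  | some g => [g]
  | none => (seg.toList.filter PySem.Chars.isalpha).map
      (fun c => String.ofList [PySem.Chars.lowerChar c, '.', 'g', 'i', 'f'])

def translate_text_to_gestures_alt (text : String) : List String :=
  let tokens := PySem.Str.split₀ (PySem.Str.strip (PySem.Str.lower text))
  (bSegment tokens).flatMap bEmit

-- ===== PRECONDITION & SPEC =====
def Spec_translate_text_to_gestures (text : String) (out : List String) : Prop := out = translate_text_to_gestures_alt text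
instance (text : String) (out : List String) : Decidable (Spec_translate_text_to_gestures text out) := by unfold Spec_translate_text_to_gestures; infer_instance

-- ===== CLAIM (what is proved, stated in full; the proofs are below) =====
def Claim_equal_translate_text_to_gestures : Prop := ∀ (text : String), Dom_translate_text_to_gestures text → Spec_translate_text_to_gestures text (translate_text_to_gestures text)

-- ===== LEMMAS AND PROOFS =====

-- every word produced by str.split() is free of whitespace characters
theorem split0_go_nospace (s cur : List Char) (acc : List (List Char))
    (hcur : ∀ c ∈ cur, PySem.Chars.isspace c = false)
    (hacc : ∀ w ∈ acc, ∀ c ∈ w, PySem.Chars.isspace c = false) :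
    ∀ w ∈ PySem.Chars.split₀.go s cur acc, ∀ c ∈ w, PySem.Chars.isspace c = false := by
  induction s generalizing cur acc with
  | nil =>
    intro w hw
    unfold PySem.Chars.split₀.go at hw
    split at hw
    · exact hacc w (by simpa using hw)
    · simp only [List.mem_reverse, List.mem_cons] at hw
      rcases hw with h | h
      · subst h; intro c hc; exact hcur c (by simpa using hc)
      · exact hacc w h
  | cons x rest ih =>
    intro w hw
    unfold PySem.Chars.split₀.go at hw
    split at hw
    · split at hw
      · exact ih [] acc (by simp) hacc w hw
      · refine ih [] _ (by simp) ?_ w hw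
        intro w' hw' c hc
        rcases List.mem_cons.mp hw' with h | h
        · subst h; exact hcur c (by simpa using hc)
        · exact hacc w' h c hc
    · rename_i hx
      refine ih (x :: cur) acc ?_ hacc w hw
      intro c hc
      rcases List.mem_cons.mp hc with h | h
      · subst h; simpa using hx
      · exact hcur c h

theorem tokens_nospace (s : String) :
    ∀ t ∈ PySem.Str.split₀ s, ' ' ∉ t.toList := by
  intro t ht hsp
  simp only [PySem.Str.split₀, List.mem_map] at ht
  obtain ⟨w, hw, rfl⟩ := ht
  have := split0_go_nospace s.toList [] [] (by simp) (by simp) w hw ' ' (by simpa using hsp)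
  simp [PySem.Chars.isspace] at this

theorem toList_inj (s t : String) (h : s.toList = t.toList) : s = t := by
  have := congrArg String.ofList h; simpa using this

theorem join_two (t1 t2 : String) :
    (PySem.Str.join " " [t1, t2]).toList = t1.toList ++ ' ' :: t2.toList := by
  simp [PySem.Str.join, PySem.Chars.join, List.intercalate, List.intersperse]

theorem append_space_thankyou (l1 l2 : List Char) (h : ' ' ∉ l1)
    (he : l1 ++ ' ' :: l2 = ['t','h','a','n','k',' ','y','o','u']) :
    l1 = ['t','h','a','n','k'] ∧ l2 = ['y','o','u'] := by
  rcases l1 with _|⟨a,_|⟨b,_|⟨c,_|⟨d,_|⟨e,_|⟨f,l⟩⟩⟩⟩⟩⟩ <;> simp_all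

-- the joined 2-token candidate equals "thank you" exactly when the tokens are "thank","you"
theorem thankyou_iff (t1 t2 : String) (h1 : ' ' ∉ t1.toList) :
    PySem.Str.join " " [t1, t2] = "thank you" ↔ (t1 = "thank" ∧ t2 = "you") := by
  constructor
  · intro he
    have h2 := congrArg String.toList he
    rw [join_two] at h2
    have h3 : ("thank you" : String).toList = ['t','h','a','n','k',' ','y','o','u'] := by decide
    rw [h3] at h2
    obtain ⟨e1, e2⟩ := append_space_thankyou _ _ h1 h2
    exact ⟨toList_inj _ _ (by rw [e1]; decide), toList_inj _ _ (by rw [e2]; decide)⟩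
  · rintro ⟨rfl, rfl⟩; decide

-- the single-word tails of the two inner loops agree
theorem tail_eq (tokens : List String) (i : Nat) (t1 : String) (rest : List String)
    (hd : tokens.drop i = t1 :: rest) (hi : i + 1 ≤ tokens.length) :
    aFindMatch tokens i ["hello", "yes", "no", "please"] =
      (bSegTry (t1 :: rest)
          [(["hello"],"hello"),(["yes"],"yes"),(["no"],"no"),(["please"],"please")]).map
        (fun p => (PySem.Dict.getD ASL_DICT p.1 "", p.2)) := by
  have e1 : (PySem.Str.split₀ "hello").length = 1 := by decide
  have e2 : (PySem.Str.split₀ "yes").length = 1 := by decide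
  have e3 : (PySem.Str.split₀ "no").length = 1 := by decide
  have e4 : (PySem.Str.split₀ "please").length = 1 := by decide
  have hj : PySem.Str.join " " [t1] = t1 := by simp [PySem.Str.join]
  simp only [aFindMatch, bSegTry, e1, e2, e3, e4, PySem.List.slice_natCast_add, hd,
    List.take_succ_cons, List.take_zero, List.length_cons, List.length_nil, hi, if_true, hj]
  by_cases h1 : t1 = "hello"
  · subst h1; simp
  · rw [if_neg h1, if_neg (by simpa using h1 : ¬([t1] = ["hello"]))]
    by_cases h2 : t1 = "yes"
    · subst h2; simp
    · rw [if_neg h2, if_neg (by simpa using h2 : ¬([t1] = ["yes"]))]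
      by_cases h3 : t1 = "no"
      · subst h3; simp
      · rw [if_neg h3, if_neg (by simpa using h3 : ¬([t1] = ["no"]))]
        by_cases h4 : t1 = "please"
        · subst h4; simp
        · rw [if_neg h4, if_neg (by simpa using h4 : ¬([t1] = ["please"]))]
          rfl

-- one position: A's key scan returns exactly B's segmentation probe (with the gif filled in)
theorem step_eq (tokens : List String) (i : Nat) (t1 : String) (rest : List String)
    (hd : tokens.drop i = t1 :: rest) (hi : i < tokens.length) (ht1 : ' ' ∉ t1.toList) :
    aFindMatch tokens i aPhraseKeys =
      (bSegTry (t1 :: rest) bPhrases).map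
        (fun p => (PySem.Dict.getD ASL_DICT p.1 "", p.2)) := by
  have hAP : aPhraseKeys = ["thank you", "hello", "yes", "no", "please"] := by decide
  have hBP : bPhrases = [(["thank","you"],"thank you"),(["hello"],"hello"),
      (["yes"],"yes"),(["no"],"no"),(["please"],"please")] := by decide
  have eTY : (PySem.Str.split₀ "thank you").length = 2 := by decide
  rw [hAP, hBP]
  by_cases h2 : i + 2 ≤ tokens.length
  · obtain ⟨t2, rest2, rfl⟩ : ∃ a b, rest = a :: b := by
      cases hdd : rest with
      | nil => exfalso; have := congrArg List.length hd; simp [hdd] at this; omega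
      | cons a b => exact ⟨a, b, rfl⟩
    have hsl : PySem.List.slice tokens (some (i : Int)) (some ((i : Int) + ((2 : Nat) : Int))) = [t1, t2] := by
      rw [PySem.List.slice_natCast_add, hd]; rfl
    simp only [aFindMatch, bSegTry, eTY, hsl, List.length_cons, List.length_nil,
      List.take_succ_cons, List.take_zero, h2, if_true]
    by_cases hty : t1 = "thank" ∧ t2 = "you"
    · obtain ⟨rfl, rfl⟩ := hty
      rw [if_pos ((thankyou_iff _ _ ht1).mpr ⟨rfl, rfl⟩), if_pos rfl]
      rfl
    · rw [if_neg (fun h => hty ((thankyou_iff _ _ ht1).mp h)),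
          if_neg (by simpa using hty : ¬([t1, t2] = ["thank", "you"]))]
      exact tail_eq tokens i t1 (t2 :: rest2) hd (by omega)
  · obtain rfl : rest = [] := by
      have := congrArg List.length hd; simp at this
      cases rest with
      | nil => rfl
      | cons a b => exfalso; simp at this; omega
    simp only [aFindMatch, bSegTry, eTY, List.length_cons, List.length_nil,
      List.take_succ_cons, List.take_nil, if_neg h2]
    rw [if_neg (by simp : ¬([t1] = ["thank", "you"]))]
    exact tail_eq tokens i t1 [] hd (by omega)

-- a segment produced from a dict phrase emits exactly its gif
theorem bSegTry_key (d : List String) (k : String) (n : Nat)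
    (h : bSegTry d bPhrases = some (k, n)) :
    bEmit k = [PySem.Dict.getD ASL_DICT k ""] := by
  have hBP : bPhrases = [(["thank","you"],"thank you"),(["hello"],"hello"),
      (["yes"],"yes"),(["no"],"no"),(["please"],"please")] := by decide
  rw [hBP] at h
  simp only [bSegTry] at h
  split_ifs at h <;> simp only [Option.some.injEq, Prod.mk.injEq] at h <;>
    (obtain ⟨rfl, -⟩ := h; decide)

-- an unmatched token is not a dict key
theorem segTry_none_get (t1 : String) (rest : List String) (ht1 : ' ' ∉ t1.toList)
    (hn : bSegTry (t1 :: rest) bPhrases = none) :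
    PySem.Dict.get? ASL_DICT t1 = none := by
  have hBP : bPhrases = [(["thank","you"],"thank you"),(["hello"],"hello"),
      (["yes"],"yes"),(["no"],"no"),(["please"],"please")] := by decide
  rw [hBP] at hn
  simp only [bSegTry, List.length_cons, List.length_nil, List.take_succ_cons,
    List.take_zero] at hn
  split_ifs at hn with hc1 hc2 hc3 hc4 hc5
  have n1 : ¬("hello" = t1) := fun h => hc2 (by rw [← h])
  have n3 : ¬("yes" = t1) := fun h => hc3 (by rw [← h])
  have n4 : ¬("no" = t1) := fun h => hc4 (by rw [← h])
  have n5 : ¬("please" = t1) := fun h => hc5 (by rw [← h])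
  have nty : ¬("thank you" = t1) := fun h => ht1 (by rw [← h]; decide)
  have hmk : ASL_DICT = PySem.Dict.mk [("hello","hello.gif"),("thank you","thank you.gif"),
      ("yes","yes.gif"),("no","no.gif"),("please","please.gif")] := by decide
  rw [hmk]
  simp only [PySem.Dict.get?_mk_cons, beq_iff_eq, if_neg n1, if_neg nty, if_neg n3,
    if_neg n4, if_neg n5]
  simp [PySem.Dict.get?]

-- the two stages of B, fused, equal A's single loop
theorem loop_eq (tokens : List String) (ht : ∀ t ∈ tokens, ' ' ∉ t.toList) :
    ∀ n i gestures, tokens.length - i ≤ n →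
      aLoop tokens i gestures = gestures ++ (bSegment (tokens.drop i)).flatMap bEmit := by
  intro n
  induction n with
  | zero =>
    intro i g hn
    have hge : tokens.length ≤ i := by omega
    rw [aLoop]
    simp only [dif_neg (show ¬ i < tokens.length by omega)]
    rw [List.drop_eq_nil_of_le hge, bSegment]
    simp
  | succ m ih =>
    intro i g hn
    by_cases h : i < tokens.length
    · obtain ⟨t1, rest, hd⟩ : ∃ t r, tokens.drop i = t :: r := by
        cases hdd : tokens.drop i with
        | nil => exfalso; have := congrArg List.length hdd; simp at this; omega
        | cons a b => exact ⟨a, b, rfl⟩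
      have hne : tokens.drop i ≠ [] := by rw [hd]; simp
      have ht1 : ' ' ∉ t1.toList :=
        ht t1 (List.drop_subset _ _ (by rw [hd]; exact List.mem_cons_self))
      rw [aLoop]
      simp only [dif_pos h]
      rw [hd] at hne ⊢
      rw [step_eq tokens i t1 rest hd h ht1]
      rw [bSegment]
      simp only [dif_neg hne]
      cases hsb : bSegTry (t1 :: rest) bPhrases with
      | some p =>
        obtain ⟨k, klen⟩ := p
        have hkpos : 0 < klen := bSegTry_pos _ _ (by decide) k klen hsb
        simp only [Option.map_some]
        have hdrop : (t1 :: rest).drop klen = tokens.drop (i + klen) := by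
          rw [← hd, List.drop_drop]
        rw [hdrop, List.flatMap_cons, bSegTry_key _ _ _ hsb]
        have := ih (i + klen) (g ++ [PySem.Dict.getD ASL_DICT k ""]) (by omega)
        rw [this]
        simp
      | none =>
        simp only [Option.map_none, List.head_cons, List.tail_cons]
        have hget : tokens[i] = t1 := by
          have h0 : (tokens.drop i)[0]'(by rw [hd]; simp) = tokens[i] := by simp
          rw [← h0]; simp [hd]
        rw [hget, PySem.List.foldl_append_if]
        have htail : rest = tokens.drop (i + 1) := by
          rw [← List.tail_drop, hd]
          rfl
        rw [List.flatMap_cons]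
        have hemit : bEmit t1 = (t1.toList.filter PySem.Chars.isalpha).map
            (fun c => String.ofList [PySem.Chars.lowerChar c, '.', 'g', 'i', 'f']) := by
          rw [bEmit, segTry_none_get t1 rest ht1 hsb]
        rw [hemit, htail]
        rw [ih (i + 1) (g ++ (t1.toList.filter PySem.Chars.isalpha).map
            (fun c => String.ofList [PySem.Chars.lowerChar c, '.', 'g', 'i', 'f'])) (by omega)]
        simp
    · rw [aLoop]
      simp only [dif_neg h]
      rw [List.drop_eq_nil_of_le (by omega), bSegment]
      simp

-- ===== VERDICT (by name: the statement is the Claim_ definition above) =====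
theorem translate_text_to_gestures_spec : Claim_equal_translate_text_to_gestures := by
  intro text _
  unfold Spec_translate_text_to_gestures translate_text_to_gestures translate_text_to_gestures_alt
  exact loop_eq _ (tokens_nospace _)
    (PySem.Str.split₀ (PySem.Str.strip (PySem.Str.lower text))).length 0 [] (by omega)
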